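-- pv_equiv track=rewrite | github.com/rafcan1/python_class | pp_70.py | most_freq_character
-- ===== SOURCE A (Python) =====
-- def most_freq_character(sentence: str) -> list[tuple[str, int]]:
--     '''
--     Function returns list of characters together with its length
--
--     Parameters:
--         sentence: any text
--     Returns:
--         List of tuples
--     '''
--     characters_freq = {}
--     for i in sentence:
--         if i not in (' ', ',', '.'):
--             characters_freq[i] = sentence.count(i)
--
--     sorted_characters_freq = sorted(
--         characters_freq.items(), key=lambda item: item[1], reverse=True)
--     return sorted_characters_freq
-- ===== SOURCE B (Python) =====
-- def most_freq_character(sentence: str) -> list[tuple[str, int]]: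
--     # One counting pass + bucket sort by count (descending), ties in first-occurrence order.
--     freq = {}
--     for ch in sentence:
--         if ch not in (' ', ',', '.'):
--             freq[ch] = freq.get(ch, 0) + 1
--     maxc = 0
--     for c in freq.values():
--         if c > maxc:
--             maxc = c
--     buckets = [[] for _ in range(maxc + 1)]
--     for ch, c in freq.items():
--         buckets[c].append((ch, c))
--     result = []
--     for c in range(maxc, 0, -1):
--         result += buckets[c]
--     return result
-- ===== Notes on version B (the rewrite author's own statement) =====
-- stated objective: faster
-- what changed: B counts each character once in a single pass (instead of calling sentence.count per occurrence, which is quadratic) and then bucket-sorts the (char, count) pairs by count instead of a comparison sort, scanning buckets from the highest count down so ties stay in first-occurrence order.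
import Mathlib
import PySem

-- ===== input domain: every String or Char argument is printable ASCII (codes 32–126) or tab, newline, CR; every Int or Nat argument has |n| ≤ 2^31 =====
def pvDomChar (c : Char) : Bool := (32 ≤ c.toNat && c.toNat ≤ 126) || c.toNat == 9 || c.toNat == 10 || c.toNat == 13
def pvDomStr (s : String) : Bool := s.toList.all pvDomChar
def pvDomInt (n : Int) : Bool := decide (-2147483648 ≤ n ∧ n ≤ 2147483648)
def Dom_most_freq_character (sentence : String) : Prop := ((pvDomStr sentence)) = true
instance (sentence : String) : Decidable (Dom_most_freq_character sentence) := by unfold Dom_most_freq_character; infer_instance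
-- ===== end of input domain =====

-- B replaces A's per-occurrence sentence.count calls by one counting pass and replaces
-- the comparison sort by a bucket sort over counts scanned from the highest count down.

-- ===== PORT A =====
def most_freq_character (sentence : String) : List (String × Int) :=
  -- characters_freq = {}; for i in sentence: if i not in (' ', ',', '.'): characters_freq[i] = sentence.count(i)
  let characters_freq : PySem.Dict String Int :=
    sentence.toList.foldl (fun d i =>
      if i ∉ ([' ', ',', '.'] : List Char) then
        d.insert (String.singleton i) ((PySem.Str.count sentence (String.singleton i) : Int))
      else d) PySem.Dict.empty
  -- sorted(characters_freq.items(), key=lambda item: item[1], reverse=True)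
  PySem.List.sorted characters_freq.items (fun item => item.2) true

-- ===== PORT B =====
def most_freq_character_alt (sentence : String) : List (String × Int) :=
  -- freq = {}; for ch in sentence: if ch not in (' ', ',', '.'): freq[ch] = freq.get(ch, 0) + 1
  let freq : PySem.Dict String Int :=
    sentence.toList.foldl (fun d ch =>
      if ch ∉ ([' ', ',', '.'] : List Char) then
        d.insert (String.singleton ch) (d.getD (String.singleton ch) 0 + 1)
      else d) PySem.Dict.empty
  -- maxc = 0; for c in freq.values(): if c > maxc: maxc = c
  let maxc : Int := freq.values.foldl (fun m c => if c > m then c else m) 0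
  -- buckets = [[] for _ in range(maxc + 1)]; for ch, c in freq.items(): buckets[c].append((ch, c))
  -- (every count c satisfies 1 ≤ c ≤ maxc, so the Python index c is the Nat c.toNat)
  let buckets : List (List (String × Int)) :=
    freq.items.foldl (fun bs p => bs.set p.2.toNat (bs.getD p.2.toNat [] ++ [p]))
      (List.replicate (maxc.toNat + 1) [])
  -- result = []; for c in range(maxc, 0, -1): result += buckets[c]
  (PySem.List.pyRange maxc 0 (-1)).foldl (fun res c => res ++ buckets.getD c.toNat []) []

-- ===== PRECONDITION & SPEC =====
def Spec_most_freq_character (sentence : String) (out : List (String × Int)) : Prop := out = most_freq_character_alt sentence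
instance (sentence : String) (out : List (String × Int)) : Decidable (Spec_most_freq_character sentence out) := by unfold Spec_most_freq_character; infer_instance

-- ===== CLAIM (what is proved, stated in full; the proofs are below) =====
def Claim_equal_most_freq_character : Prop := ∀ (sentence : String), Dom_most_freq_character sentence → Spec_most_freq_character sentence (most_freq_character sentence)

-- ===== LEMMAS AND PROOFS =====

-- the kept characters, and the 1-character strings Python iterates with
def pvFilterChar (c : Char) : Bool := !(c == ' ' || c == ',' || c == '.')
def pvKeys (sentence : String) : List String :=
  (sentence.toList.filter pvFilterChar).map String.singleton
-- the (char, count) items both dicts hold at the end, in first-occurrence order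
def pvItems (sentence : String) : List (String × Int) :=
  (PySem.Set.ofList (pvKeys sentence)).map (fun k => (k, (List.count k (pvKeys sentence) : Int)))
-- n, n-1, …, 1 as Ints
def pvDesc : Nat → List Int
  | 0 => []
  | n + 1 => ((n + 1 : Nat) : Int) :: pvDesc n

-- Python's membership test matches the Bool filter
lemma pvFilter_iff (c : Char) : (c ∉ ([' ', ',', '.'] : List Char)) ↔ pvFilterChar c = true := by
  simp [pvFilterChar]
  tauto

lemma singleton_injective : Function.Injective String.singleton := by
  intro a b h
  have := congrArg String.toList h
  simpa using this

-- str.count with a single-character needle is List.count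
lemma chars_count_go_singleton (c : Char) :
    ∀ (fuel : Nat) (l : List Char) (acc : Nat), l.length ≤ fuel →
      PySem.Chars.count.go [c] fuel l acc = acc + l.count c := by
  intro fuel
  induction fuel with
  | zero =>
    intro l acc h
    have : l = [] := by cases l <;> simp_all
    subst this
    simp [PySem.Chars.count.go]
  | succ k ih =>
    intro l acc h
    cases l with
    | nil => simp [PySem.Chars.count.go]
    | cons a t =>
      by_cases hac : a = c
      · subst hac
        have hpre : List.isPrefixOf [a] (a :: t) = true := by simp [List.isPrefixOf]
        simp only [PySem.Chars.count.go, hpre]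
        rw [if_pos trivial]
        simp only [List.length_cons, List.length_nil, List.drop_succ_cons, List.drop_zero]
        rw [ih t (acc + 1) (by simp at h; omega)]
        simp
        omega
      · have hpre : List.isPrefixOf [c] (a :: t) = false := by
          simp [List.isPrefixOf]; exact fun hh => (hac hh.symm).elim
        simp only [PySem.Chars.count.go, hpre]
        rw [if_neg (by simp)]
        rw [ih t acc (by simp at h; omega)]
        simp [hac]

lemma str_count_singleton (s : String) (c : Char) :
    PySem.Str.count s (String.singleton c) = s.toList.count c := by
  have : (String.singleton c).toList = [c] := by simp
  rw [PySem.Str.count, this]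
  rw [PySem.Chars.count]
  simp only [List.isEmpty_cons, Bool.false_eq_true, if_false]
  rw [chars_count_go_singleton c s.toList.length s.toList 0 le_rfl]
  omega

-- items of a dict built by inserting a key-determined value per key
lemma items_foldl_insert_const {ν : Type} (v : String → ν) :
    ∀ (l : List String),
      (l.foldl (fun d x => d.insert x (v x)) PySem.Dict.empty).items
        = (PySem.Set.ofList l).map (fun x => (x, v x)) := by
  intro l
  induction l using List.reverseRecOn with
  | nil => simp [PySem.Dict.empty, PySem.Set.ofList]
  | append_singleton xs x ih =>
    rw [List.foldl_append, List.foldl_cons, List.foldl_nil, PySem.Set.ofList_append_singleton]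
    set d := xs.foldl (fun d x => d.insert x (v x)) PySem.Dict.empty with hd
    by_cases hmem : x ∈ PySem.Set.ofList xs
    · have hcont : d.contains x = true := by
        rw [PySem.Dict.contains_iff_mem_keys, PySem.Dict.keys, ih]
        simp only [List.map_map]
        simpa using hmem
      rw [PySem.Dict.items_insert_of_contains d (v x) hcont, ih, PySem.Set.add_of_mem hmem]
      rw [List.map_map]
      apply List.map_congr_left
      intro a _
      by_cases hax : a = x
      · subst hax; simp
      · simp [hax]
    · have hcont : d.contains x = false := by
        rw [← Bool.not_eq_true, PySem.Dict.contains_iff_mem_keys, PySem.Dict.keys, ih]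
        simp only [List.map_map]
        simpa using hmem
      rw [PySem.Dict.items_insert_of_not_contains d (v x) hcont, ih, PySem.Set.add_of_not_mem hmem]
      simp

-- A's dict, at the end of its loop
lemma dict_items_A (s : String) :
    (s.toList.foldl (fun d i =>
      if i ∉ ([' ', ',', '.'] : List Char) then
        d.insert (String.singleton i) ((PySem.Str.count s (String.singleton i) : Int))
      else d) PySem.Dict.empty).items = pvItems s := by
  have hfun : (fun (d : PySem.Dict String Int) (i : Char) =>
      if i ∉ ([' ', ',', '.'] : List Char) then
        d.insert (String.singleton i) ((PySem.Str.count s (String.singleton i) : Int))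
      else d)
      = (fun d i => if pvFilterChar i = true then
          d.insert (String.singleton i) ((PySem.Str.count s (String.singleton i) : Int)) else d) := by
    funext d i
    by_cases h : pvFilterChar i = true
    · rw [if_pos ((pvFilter_iff i).mpr h), if_pos h]
    · rw [if_neg (fun hh => h ((pvFilter_iff i).mp hh)), if_neg h]
  rw [hfun, ← List.foldl_filter]
  have hm : (pvKeys s).foldl (fun (d : PySem.Dict String Int) k =>
        d.insert k ((PySem.Str.count s k : Int))) PySem.Dict.empty
      = (s.toList.filter pvFilterChar).foldl (fun d i =>
        d.insert (String.singleton i) ((PySem.Str.count s (String.singleton i) : Int)))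
        PySem.Dict.empty := by
    unfold pvKeys
    rw [List.foldl_map]
  rw [← hm, items_foldl_insert_const (fun k => (PySem.Str.count s k : Int)) (pvKeys s)]
  apply List.map_congr_left
  intro k hk
  have hk' : k ∈ pvKeys s := (PySem.Set.mem_ofList _ _).mp hk
  obtain ⟨c, hc, rfl⟩ := List.mem_map.mp hk'
  have hpc : pvFilterChar c = true := (List.mem_filter.mp hc).2
  have h1 : PySem.Str.count s (String.singleton c) = s.toList.count c := str_count_singleton s c
  have h2 : (s.toList.filter pvFilterChar).count c = s.toList.count c := List.count_filter hpc
  have h3 : List.count (String.singleton c) (pvKeys s) = (s.toList.filter pvFilterChar).count c := by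
    unfold pvKeys
    simp only [List.count, List.countP_map]
    apply List.countP_congr
    intro a _
    simp only [Function.comp_apply, beq_iff_eq]
    constructor
    · exact fun h => by rw [singleton_injective h]
    · exact fun h => by rw [h]
  rw [h1, h3, h2]

-- A's port produces the canonical items, stably sorted by count descending
lemma portA_eq_sorted (s : String) :
    most_freq_character s = PySem.List.sorted (pvItems s) (fun item => item.2) true := by
  simp only [most_freq_character]
  rw [dict_items_A s]

-- insertBy walks past a prefix it does not go before
lemma insertBy_append_left {α : Type} (before : α → α → Bool) (x : α) (P S : List α)
    (h : ∀ y ∈ P, before x y = false) :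
    PySem.List.insertBy before x (P ++ S) = P ++ PySem.List.insertBy before x S := by
  induction P with
  | nil => simp
  | cons p t ih =>
    have hp : before x p = false := h p (by simp)
    simp only [List.cons_append, PySem.List.insertBy, hp]
    simp only [Bool.false_eq_true, if_false]
    have := ih (fun y hy => h y (by simp [hy]))
    rw [this]

lemma insertBy_all_before {α : Type} (before : α → α → Bool) (x : α) (S : List α)
    (h : ∀ y ∈ S, before x y = true) :
    PySem.List.insertBy before x S = x :: S := by
  cases S with
  | nil => simp [PySem.List.insertBy]
  | cons p t => simp [PySem.List.insertBy, h p (by simp)]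

lemma mem_pvDesc {n : Nat} {v : Int} (h : v ∈ pvDesc n) : 1 ≤ v ∧ v ≤ n := by
  induction n with
  | zero => simp [pvDesc] at h
  | succ k ih =>
    simp [pvDesc] at h
    rcases h with h | h
    · subst h; constructor <;> [omega; simp]
    · have := ih h; push_cast at *; omega

lemma pvDesc_split (n : Nat) (c : Int) (h1 : 1 ≤ c) (h2 : c ≤ n) :
    ∃ hi lo, pvDesc n = hi ++ c :: lo ∧ (∀ v ∈ hi, c < v) ∧ (∀ v ∈ lo, v < c) := by
  induction n with
  | zero => exfalso; omega
  | succ k ih =>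
    by_cases hc : c = ((k + 1 : Nat) : Int)
    · refine ⟨[], pvDesc k, by simp [pvDesc, hc], by simp, ?_⟩
      intro v hv; have := mem_pvDesc hv; omega
    · have hck : c ≤ (k : Int) := by push_cast at hc h2 ⊢; omega
      obtain ⟨hi, lo, he, hhi, hlo⟩ := ih hck
      refine ⟨((k + 1 : Nat) : Int) :: hi, lo, by simp [pvDesc, he], ?_, hlo⟩
      intro v hv
      rcases List.mem_cons.mp hv with h | h
      · subst h; push_cast; omega
      · exact hhi v h

-- the stable descending sort is the bucket concatenation, buckets scanned high→low
lemma sorted_rev_eq_desc_flatMap {α : Type} (key : α → Int) (n : Nat) :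
    ∀ (items : List α), (∀ x ∈ items, 1 ≤ key x ∧ key x ≤ n) →
      PySem.List.sorted items key true
        = (pvDesc n).flatMap (fun c => items.filter (fun x => key x == c)) := by
  intro items
  induction items using List.reverseRecOn with
  | nil => simp [PySem.List.sorted]
  | append_singleton xs x ih =>
    intro h
    have hx := h x (by simp)
    have hxs : ∀ y ∈ xs, 1 ≤ key y ∧ key y ≤ n := fun y hy => h y (by simp [hy])
    have hstep : PySem.List.sorted (xs ++ [x]) key true
        = PySem.List.insertBy (fun a b => decide (key b < key a)) x (PySem.List.sorted xs key true) := by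
      rw [PySem.List.sorted_rev_eq_foldl_insertBy, PySem.List.sorted_rev_eq_foldl_insertBy,
        List.foldl_append]
      simp
    rw [hstep, ih hxs]
    obtain ⟨hi, lo, he, hhi, hlo⟩ := pvDesc_split n (key x) hx.1 hx.2
    rw [he]
    simp only [List.flatMap_append, List.flatMap_cons]
    rw [show ∀ (A B C : List α), A ++ (B ++ C) = (A ++ B) ++ C from fun A B C => (List.append_assoc A B C).symm]
    rw [insertBy_append_left _ _ _ _ ?hP]
    case hP =>
      intro y hy
      simp only [List.mem_append, List.mem_flatMap, List.mem_filter] at hy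
      rcases hy with ⟨c, hc, _, hkey⟩ | ⟨_, hkey⟩
      · have := hhi c hc
        simp only [beq_iff_eq] at hkey
        simp; omega
      · simp only [beq_iff_eq] at hkey
        simp; omega
    rw [insertBy_all_before _ _ _ ?hS]
    case hS =>
      intro y hy
      simp only [List.mem_flatMap, List.mem_filter] at hy
      obtain ⟨c, hc, _, hkey⟩ := hy
      have := hlo c hc
      simp only [beq_iff_eq] at hkey
      simp; omega
    have fhi : (hi.flatMap fun c => (xs ++ [x]).filter (fun y => key y == c))
        = hi.flatMap fun c => xs.filter (fun y => key y == c) := by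
      apply List.flatMap_congr
      intro c hc
      have := hhi c hc
      simp only [List.filter_append, List.filter_cons, List.filter_nil]
      have : (key x == c) = false := by simp; omega
      simp [this]
    have flo : (lo.flatMap fun c => (xs ++ [x]).filter (fun y => key y == c))
        = lo.flatMap fun c => xs.filter (fun y => key y == c) := by
      apply List.flatMap_congr
      intro c hc
      have := hlo c hc
      simp only [List.filter_append, List.filter_cons, List.filter_nil]
      have : (key x == c) = false := by simp; omega
      simp [this]
    have fc : (xs ++ [x]).filter (fun y => key y == key x)
        = xs.filter (fun y => key y == key x) ++ [x] := by
      simp [List.filter_append]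
    rw [fhi, flo, fc]
    simp

-- the bucket-filling loop, read back at one index
lemma foldl_set_append_getD {β : Type} (idx : β → Nat) :
    ∀ (items : List β) (bs : List (List β)), (∀ x ∈ items, idx x < bs.length) →
      ∀ j, (items.foldl (fun bs x => bs.set (idx x) (bs.getD (idx x) [] ++ [x])) bs).getD j []
        = bs.getD j [] ++ items.filter (fun x => idx x == j) := by
  intro items
  induction items with
  | nil => simp
  | cons a t ih =>
    intro bs h j
    simp only [List.foldl_cons, List.filter_cons]
    have ha : idx a < bs.length := h a (by simp)
    rw [ih _ (by intro x hx; rw [List.length_set]; exact h x (by simp [hx])) j]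
    by_cases hj : idx a = j
    · subst hj
      simp [List.getD, List.getElem?_set_self (by omega)]
    · have : (bs.set (idx a) (bs.getD (idx a) [] ++ [a])).getD j [] = bs.getD j [] := by
        simp [List.getD, List.getElem?_set_ne (by omega)]
      rw [this]
      simp [hj]

lemma foldl_max_bounds :
    ∀ (l : List Int) (m : Int),
      m ≤ l.foldl (fun m c => if c > m then c else m) m ∧
      ∀ x ∈ l, x ≤ l.foldl (fun m c => if c > m then c else m) m := by
  intro l
  induction l with
  | nil => simp
  | cons a t ih =>
    intro m
    constructor
    · have := (ih (if a > m then a else m)).1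
      simp only [List.foldl_cons]
      split_ifs at * <;> omega
    · intro x hx
      simp only [List.foldl_cons]
      rcases List.mem_cons.mp hx with h | h
      · subst h
        have := (ih (if x > m then x else m)).1
        split_ifs at * <;> omega
      · exact (ih _).2 x h

lemma pyRange_desc (n : Nat) : PySem.List.pyRange (n : Int) 0 (-1) = pvDesc n := by
  induction n with
  | zero => simp [pvDesc, PySem.List.pyRange_neg_one_eq_nil]
  | succ k ih =>
    rw [PySem.List.pyRange_neg_one_cons (by push_cast; omega)]
    have : ((k + 1 : Nat) : Int) - 1 = (k : Int) := by push_cast; ring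
    rw [this, ih]; simp [pvDesc]

-- B's dict, at the end of its loop
lemma dict_B (s : String) :
    (s.toList.foldl (fun d ch =>
      if ch ∉ ([' ', ',', '.'] : List Char) then
        d.insert (String.singleton ch) (d.getD (String.singleton ch) 0 + 1)
      else d) PySem.Dict.empty) = PySem.Dict.counter (pvKeys s) := by
  have hfun : (fun (d : PySem.Dict String Int) (ch : Char) =>
      if ch ∉ ([' ', ',', '.'] : List Char) then
        d.insert (String.singleton ch) (d.getD (String.singleton ch) 0 + 1)
      else d)
      = (fun d ch => if pvFilterChar ch = true then
          d.insert (String.singleton ch) (d.getD (String.singleton ch) 0 + 1) else d) := by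
    funext d ch
    by_cases h : pvFilterChar ch = true
    · rw [if_pos ((pvFilter_iff ch).mpr h), if_pos h]
    · rw [if_neg (fun hh => h ((pvFilter_iff ch).mp hh)), if_neg h]
  rw [hfun, ← List.foldl_filter]
  have hm : (pvKeys s).foldl (fun (d : PySem.Dict String Int) k =>
        d.insert k (d.getD k 0 + 1)) PySem.Dict.empty
      = (s.toList.filter pvFilterChar).foldl (fun d ch =>
        d.insert (String.singleton ch) (d.getD (String.singleton ch) 0 + 1)) PySem.Dict.empty := by
    unfold pvKeys
    rw [List.foldl_map]
  rw [← hm, PySem.Dict.foldl_insert_getD_add_one_eq_counter]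

-- B's port also produces the canonical items, bucket-sorted
lemma portB_eq_sorted (s : String) :
    most_freq_character_alt s = PySem.List.sorted (pvItems s) (fun item => item.2) true := by
  simp only [most_freq_character_alt]
  rw [dict_B s]
  have hpv : (PySem.Set.ofList (pvKeys s)).map (fun k => (k, (List.count k (pvKeys s) : Int)))
      = pvItems s := rfl
  rw [PySem.Dict.items_counter, hpv]
  set items : List (String × Int) := pvItems s with hitems
  have hvals : (PySem.Dict.counter (pvKeys s)).values = items.map (fun p => p.2) := by
    rw [PySem.Dict.values, PySem.Dict.items_counter, hpv]
  rw [hvals]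
  set maxc : Int := ((items.map fun p => p.2).foldl (fun m c => if c > m then c else m) 0) with hmaxc
  have hmax0 : 0 ≤ maxc := (foldl_max_bounds _ 0).1
  have hub : ∀ p ∈ items, 1 ≤ p.2 ∧ p.2 ≤ maxc := by
    intro p hp
    constructor
    · rw [hitems] at hp
      obtain ⟨k, hk, rfl⟩ := List.mem_map.mp hp
      have : k ∈ pvKeys s := (PySem.Set.mem_ofList _ _).mp hk
      have := List.count_pos_iff.mpr this
      simp only []
      omega
    · exact (foldl_max_bounds _ 0).2 p.2 (List.mem_map.mpr ⟨p, hp, rfl⟩)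
  have hbuck : ∀ j, ((items.foldl (fun bs p => bs.set p.2.toNat (bs.getD p.2.toNat [] ++ [p]))
      (List.replicate (maxc.toNat + 1) ([] : List (String × Int))))).getD j []
      = items.filter (fun p => p.2.toNat == j) := by
    intro j
    rw [foldl_set_append_getD (fun p => p.2.toNat) items _ ?hlt j]
    case hlt =>
      intro p hp
      rw [List.length_replicate]
      have := hub p hp
      show p.2.toNat < maxc.toNat + 1
      omega
    rw [List.getD_eq_getElem?_getD]
    rcases Nat.lt_or_ge j (maxc.toNat + 1) with hj | hj
    · simp [hj]
    · have hnil : List.filter (fun p => p.2.toNat == j) items = [] := by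
        apply List.filter_eq_nil_iff.mpr
        intro p hp
        have := hub p hp
        simp only [beq_iff_eq]
        omega
      simp [Nat.not_lt.mpr hj, hnil]
  rw [PySem.List.foldl_append_eq_flatMap, List.nil_append]
  have hrange : PySem.List.pyRange maxc 0 (-1) = pvDesc maxc.toNat := by
    rw [show maxc = ((maxc.toNat : Nat) : Int) from (Int.toNat_of_nonneg hmax0).symm]
    rw [pyRange_desc]
    simp [Int.toNat_of_nonneg hmax0]
  rw [hrange]
  rw [sorted_rev_eq_desc_flatMap (fun item => item.2) maxc.toNat items ?hb]
  case hb =>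
    intro p hp
    have := hub p hp
    constructor
    · exact this.1
    · rw [Int.toNat_of_nonneg hmax0]; exact this.2
  apply List.flatMap_congr
  intro c hc
  have hcb := mem_pvDesc hc
  rw [hbuck c.toNat]
  apply List.filter_congr
  intro p hp
  have h12 := hub p hp
  by_cases h : p.2 = c
  · simp [h]
  · have hne : p.2.toNat ≠ c.toNat := by omega
    simp [h, hne]

-- ===== VERDICT (by name: the statement is the Claim_ definition above) =====
theorem most_freq_character_spec : Claim_equal_most_freq_character := by
  intro s _
  unfold Spec_most_freq_character
  rw [portA_eq_sorted, portB_eq_sorted]
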